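-- pv_equiv track=rewrite | github.com/MAZ-dev834/open-ctf-agent | scripts/learn/ctf_memory_recommend.py | build_action_hints
-- ===== SOURCE A (Python) =====
-- def build_action_hints(text: str, category: str) -> list[str]:
--     low = text.lower()
--     actions: list[str] = []
--
--     # Cross-cutting first moves
--     if any(k in low for k in ("source", "源码", "provided code", "zip")):
--         actions.append("read provided source/attachments first; map input -> transform -> check")
--     if any(k in low for k in ("nc ", "netcat", "remote", "instance", "server")):
--         actions.append("confirm interaction protocol and rate limits before brute-force")
--
--     if category == "crypto":
--         if any(k in low for k in ("rsa", "modulus", "n=", "e=", "d=")):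
--             actions.append("check RSA structure: small e, shared factors, partial key, common modulus")
--         if any(k in low for k in ("lattice", "lll", "hnp", "coppersmith", "small root")):
--             actions.append("estimate lattice dimensions/noise bounds; verify HNP/LLL preconditions")
--         if any(k in low for k in ("ecdsa", "ecdh", "ecc", "nonce", "k reuse")):
--             actions.append("test nonce reuse/partial leakage; recover private key via HNP")
--         if any(k in low for k in ("oracle", "padding", "bleichenbacher", "oaep", "cbc")):
--             actions.append("measure oracle distinguishability before large queries")
--         if not actions:
--             actions.append("identify primitive + leakage model; search for exact model/paper keywords")
--
--     elif category == "web":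
--         if any(k in low for k in ("auth", "login", "cookie", "session", "jwt")):
--             actions.append("trace auth/state transitions; reproduce one minimal request chain")
--         if any(k in low for k in ("upload", "file", "path traversal", "lfi", "rfi")):
--             actions.append("map file handling and path normalization; attempt controlled upload/reading")
--         if any(k in low for k in ("sqli", "xss", "ssti", "ssrf")):
--             actions.append("verify vuln class with a minimal payload before fuzzing")
--         if not actions:
--             actions.append("request/response map first; then automate minimal chain")
--
--     elif category == "rev":
--         actions.append("locate compare/check site first; trace inputs backward")
--         if any(k in low for k in ("vm", "bytecode", "wasm", "obfus", "packer")):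
--             actions.append("decide static vs light dynamic; avoid full tracing until constraints appear")
--
--     elif category == "pwn":
--         actions.append("confirm mitigations and crash primitive; identify stack/heap/fmt direction")
--         if any(k in low for k in ("libc", "ld", "one_gadget")):
--             actions.append("align libc/ld early; stabilize offsets before exploit")
--
--     elif category == "forensics":
--         actions.append("do file triage: type/metadata/strings/extract; then targeted tools")
--         if any(k in low for k in ("pcap", "pcapng", "wireshark", "tshark")):
--             actions.append("filter by protocols and carve artifacts; track offsets")
--
--     elif category == "osint":
--         actions.append("extract unique identifiers first; pivot via reliable sources")
--
--     elif category == "malware":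
--         actions.append("check packer/obfuscation; carve config/IOC before heavy dynamic analysis")
--
--     elif category == "misc":
--         actions.append("build artifact index; automate decode/extract loops early")
--
--     # Keep the list short and non-redundant
--     deduped: list[str] = []
--     for a in actions:
--         if a not in deduped:
--             deduped.append(a)
--         if len(deduped) >= 4:
--             break
--     return deduped
-- ===== SOURCE B (Python) =====
-- # B: one keyword-detection pass over the whole vocabulary builds a set of hits,
-- # then a single flat rule catalogue is scanned with an early-exit cap of 4.
-- # No dedup pass is needed: all hints are pairwise distinct string literals.
--
-- KEYWORDS = [
--     "source", "\u6e90\u7801", "provided code", "zip",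
--     "nc ", "netcat", "remote", "instance", "server",
--     "rsa", "modulus", "n=", "e=", "d=",
--     "lattice", "lll", "hnp", "coppersmith", "small root",
--     "ecdsa", "ecdh", "ecc", "nonce", "k reuse",
--     "oracle", "padding", "bleichenbacher", "oaep", "cbc",
--     "auth", "login", "cookie", "session", "jwt",
--     "upload", "file", "path traversal", "lfi", "rfi",
--     "sqli", "xss", "ssti", "ssrf",
--     "vm", "bytecode", "wasm", "obfus", "packer",
--     "libc", "ld", "one_gadget",
--     "pcap", "pcapng", "wireshark", "tshark",
-- ]
--
-- # (category or None, keywords or None (= always), is_fallback, hint)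
-- RULES = [
--     (None, ("source", "\u6e90\u7801", "provided code", "zip"), False,
--      "read provided source/attachments first; map input -> transform -> check"),
--     (None, ("nc ", "netcat", "remote", "instance", "server"), False,
--      "confirm interaction protocol and rate limits before brute-force"),
--     ("crypto", ("rsa", "modulus", "n=", "e=", "d="), False,
--      "check RSA structure: small e, shared factors, partial key, common modulus"),
--     ("crypto", ("lattice", "lll", "hnp", "coppersmith", "small root"), False,
--      "estimate lattice dimensions/noise bounds; verify HNP/LLL preconditions"),
--     ("crypto", ("ecdsa", "ecdh", "ecc", "nonce", "k reuse"), False,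
--      "test nonce reuse/partial leakage; recover private key via HNP"),
--     ("crypto", ("oracle", "padding", "bleichenbacher", "oaep", "cbc"), False,
--      "measure oracle distinguishability before large queries"),
--     ("crypto", None, True,
--      "identify primitive + leakage model; search for exact model/paper keywords"),
--     ("web", ("auth", "login", "cookie", "session", "jwt"), False,
--      "trace auth/state transitions; reproduce one minimal request chain"),
--     ("web", ("upload", "file", "path traversal", "lfi", "rfi"), False,
--      "map file handling and path normalization; attempt controlled upload/reading"),
--     ("web", ("sqli", "xss", "ssti", "ssrf"), False,
--      "verify vuln class with a minimal payload before fuzzing"),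
--     ("web", None, True,
--      "request/response map first; then automate minimal chain"),
--     ("rev", None, False,
--      "locate compare/check site first; trace inputs backward"),
--     ("rev", ("vm", "bytecode", "wasm", "obfus", "packer"), False,
--      "decide static vs light dynamic; avoid full tracing until constraints appear"),
--     ("pwn", None, False,
--      "confirm mitigations and crash primitive; identify stack/heap/fmt direction"),
--     ("pwn", ("libc", "ld", "one_gadget"), False,
--      "align libc/ld early; stabilize offsets before exploit"),
--     ("forensics", None, False,
--      "do file triage: type/metadata/strings/extract; then targeted tools"),
--     ("forensics", ("pcap", "pcapng", "wireshark", "tshark"), False,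
--      "filter by protocols and carve artifacts; track offsets"),
--     ("osint", None, False,
--      "extract unique identifiers first; pivot via reliable sources"),
--     ("malware", None, False,
--      "check packer/obfuscation; carve config/IOC before heavy dynamic analysis"),
--     ("misc", None, False,
--      "build artifact index; automate decode/extract loops early"),
-- ]
--
--
-- def build_action_hints(text: str, category: str) -> list[str]:
--     low = text.lower()
--     # stage 1: one vocabulary scan -> set of keywords present in the text
--     hits = {k for k in KEYWORDS if k in low}
--     # stage 2: applicable rules, each reduced to (is_fallback, matched, hint)
--     sel = [(fb, keys is None or any(k in hits for k in keys), hint)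
--            for cat, keys, fb, hint in RULES
--            if cat is None or cat == category]
--     # stage 3: collect hints with an early-exit cap of 4; fallbacks need an empty result
--     out: list[str] = []
--     for fb, matched, hint in sel:
--         if len(out) >= 4:
--             break
--         if (not fb and matched) or (fb and not out):
--             out.append(hint)
--     return out
-- ===== Notes on version B (the rewrite author's own statement) =====
-- stated objective: alternative
-- what changed: B first scans the whole keyword vocabulary once to build a set of keywords present in the lowered text, then makes a single pass over one flat rule catalogue (rule = category tag, keyword set, fallback flag, hint) selecting hints by set membership, with fallback rules firing only on an empty result and an early exit at 4 hints; the dedup pass is eliminated because all hints are distinct literals.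
import Mathlib
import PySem

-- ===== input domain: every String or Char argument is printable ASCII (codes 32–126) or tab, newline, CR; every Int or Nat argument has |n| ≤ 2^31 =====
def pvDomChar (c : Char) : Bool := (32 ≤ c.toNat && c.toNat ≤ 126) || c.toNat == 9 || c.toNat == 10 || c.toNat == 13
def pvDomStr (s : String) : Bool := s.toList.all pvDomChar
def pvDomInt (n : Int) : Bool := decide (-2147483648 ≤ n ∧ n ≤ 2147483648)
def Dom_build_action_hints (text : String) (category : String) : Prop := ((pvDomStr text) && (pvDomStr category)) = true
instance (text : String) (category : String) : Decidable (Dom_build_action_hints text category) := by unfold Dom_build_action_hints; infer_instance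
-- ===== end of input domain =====

-- B ('alternative'): one vocabulary scan builds the set of present keywords, then one pass over a
-- flat rule catalogue picks hints (fallbacks on empty result, early exit at 4); no dedup pass.

-- ===== PORT A =====
-- dedup loop of A: 'for a in actions: if a not in deduped: append; if len(deduped) >= 4: break'
def pvDedupA : List String → List String → List String
  | d, [] => d
  | d, a :: rest =>
      if 4 ≤ d.length then d
      else pvDedupA (if d.contains a then d else d ++ [a]) rest

def build_action_hints (text : String) (category : String) : List String :=
  let low := PySem.Str.lower text
  let actions : List String := []
  let actions := if ["source", "源码", "provided code", "zip"].any (fun k => PySem.Str.isIn k low) then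
      actions ++ ["read provided source/attachments first; map input -> transform -> check"] else actions
  let actions := if ["nc ", "netcat", "remote", "instance", "server"].any (fun k => PySem.Str.isIn k low) then
      actions ++ ["confirm interaction protocol and rate limits before brute-force"] else actions
  let actions :=
    if category == "crypto" then
      let actions := if ["rsa", "modulus", "n=", "e=", "d="].any (fun k => PySem.Str.isIn k low) then
          actions ++ ["check RSA structure: small e, shared factors, partial key, common modulus"] else actions
      let actions := if ["lattice", "lll", "hnp", "coppersmith", "small root"].any (fun k => PySem.Str.isIn k low) then
          actions ++ ["estimate lattice dimensions/noise bounds; verify HNP/LLL preconditions"] else actions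
      let actions := if ["ecdsa", "ecdh", "ecc", "nonce", "k reuse"].any (fun k => PySem.Str.isIn k low) then
          actions ++ ["test nonce reuse/partial leakage; recover private key via HNP"] else actions
      let actions := if ["oracle", "padding", "bleichenbacher", "oaep", "cbc"].any (fun k => PySem.Str.isIn k low) then
          actions ++ ["measure oracle distinguishability before large queries"] else actions
      if actions == ([] : List String) then
        actions ++ ["identify primitive + leakage model; search for exact model/paper keywords"] else actions
    else if category == "web" then
      let actions := if ["auth", "login", "cookie", "session", "jwt"].any (fun k => PySem.Str.isIn k low) then
          actions ++ ["trace auth/state transitions; reproduce one minimal request chain"] else actions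
      let actions := if ["upload", "file", "path traversal", "lfi", "rfi"].any (fun k => PySem.Str.isIn k low) then
          actions ++ ["map file handling and path normalization; attempt controlled upload/reading"] else actions
      let actions := if ["sqli", "xss", "ssti", "ssrf"].any (fun k => PySem.Str.isIn k low) then
          actions ++ ["verify vuln class with a minimal payload before fuzzing"] else actions
      if actions == ([] : List String) then
        actions ++ ["request/response map first; then automate minimal chain"] else actions
    else if category == "rev" then
      let actions := actions ++ ["locate compare/check site first; trace inputs backward"]
      if ["vm", "bytecode", "wasm", "obfus", "packer"].any (fun k => PySem.Str.isIn k low) then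
        actions ++ ["decide static vs light dynamic; avoid full tracing until constraints appear"] else actions
    else if category == "pwn" then
      let actions := actions ++ ["confirm mitigations and crash primitive; identify stack/heap/fmt direction"]
      if ["libc", "ld", "one_gadget"].any (fun k => PySem.Str.isIn k low) then
        actions ++ ["align libc/ld early; stabilize offsets before exploit"] else actions
    else if category == "forensics" then
      let actions := actions ++ ["do file triage: type/metadata/strings/extract; then targeted tools"]
      if ["pcap", "pcapng", "wireshark", "tshark"].any (fun k => PySem.Str.isIn k low) then
        actions ++ ["filter by protocols and carve artifacts; track offsets"] else actions
    else if category == "osint" then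
      actions ++ ["extract unique identifiers first; pivot via reliable sources"]
    else if category == "malware" then
      actions ++ ["check packer/obfuscation; carve config/IOC before heavy dynamic analysis"]
    else if category == "misc" then
      actions ++ ["build artifact index; automate decode/extract loops early"]
    else actions
  pvDedupA [] actions

-- ===== PORT B =====
def pvKeywords : List String :=
  [ "source", "源码", "provided code", "zip",
    "nc ", "netcat", "remote", "instance", "server",
    "rsa", "modulus", "n=", "e=", "d=",
    "lattice", "lll", "hnp", "coppersmith", "small root",
    "ecdsa", "ecdh", "ecc", "nonce", "k reuse",
    "oracle", "padding", "bleichenbacher", "oaep", "cbc",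
    "auth", "login", "cookie", "session", "jwt",
    "upload", "file", "path traversal", "lfi", "rfi",
    "sqli", "xss", "ssti", "ssrf",
    "vm", "bytecode", "wasm", "obfus", "packer",
    "libc", "ld", "one_gadget",
    "pcap", "pcapng", "wireshark", "tshark" ]

-- (category or None, keywords or None (= always), is_fallback, hint)
def pvRules : List (Option String × Option (List String) × Bool × String) :=
  [ (none, some ["source", "源码", "provided code", "zip"], false,
     "read provided source/attachments first; map input -> transform -> check"),
    (none, some ["nc ", "netcat", "remote", "instance", "server"], false,
     "confirm interaction protocol and rate limits before brute-force"),
    (some "crypto", some ["rsa", "modulus", "n=", "e=", "d="], false,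
     "check RSA structure: small e, shared factors, partial key, common modulus"),
    (some "crypto", some ["lattice", "lll", "hnp", "coppersmith", "small root"], false,
     "estimate lattice dimensions/noise bounds; verify HNP/LLL preconditions"),
    (some "crypto", some ["ecdsa", "ecdh", "ecc", "nonce", "k reuse"], false,
     "test nonce reuse/partial leakage; recover private key via HNP"),
    (some "crypto", some ["oracle", "padding", "bleichenbacher", "oaep", "cbc"], false,
     "measure oracle distinguishability before large queries"),
    (some "crypto", none, true,
     "identify primitive + leakage model; search for exact model/paper keywords"),
    (some "web", some ["auth", "login", "cookie", "session", "jwt"], false,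
     "trace auth/state transitions; reproduce one minimal request chain"),
    (some "web", some ["upload", "file", "path traversal", "lfi", "rfi"], false,
     "map file handling and path normalization; attempt controlled upload/reading"),
    (some "web", some ["sqli", "xss", "ssti", "ssrf"], false,
     "verify vuln class with a minimal payload before fuzzing"),
    (some "web", none, true,
     "request/response map first; then automate minimal chain"),
    (some "rev", none, false,
     "locate compare/check site first; trace inputs backward"),
    (some "rev", some ["vm", "bytecode", "wasm", "obfus", "packer"], false,
     "decide static vs light dynamic; avoid full tracing until constraints appear"),
    (some "pwn", none, false,
     "confirm mitigations and crash primitive; identify stack/heap/fmt direction"),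
    (some "pwn", some ["libc", "ld", "one_gadget"], false,
     "align libc/ld early; stabilize offsets before exploit"),
    (some "forensics", none, false,
     "do file triage: type/metadata/strings/extract; then targeted tools"),
    (some "forensics", some ["pcap", "pcapng", "wireshark", "tshark"], false,
     "filter by protocols and carve artifacts; track offsets"),
    (some "osint", none, false,
     "extract unique identifiers first; pivot via reliable sources"),
    (some "malware", none, false,
     "check packer/obfuscation; carve config/IOC before heavy dynamic analysis"),
    (some "misc", none, false,
     "build artifact index; automate decode/extract loops early") ]

-- stage-3 loop of Source B: early-exit cap at 4, fallbacks fire only on an empty result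
def pvCollect : List String → List (Bool × Bool × String) → List String
  | out, [] => out
  | out, (fb, m, hint) :: rest =>
      if 4 ≤ out.length then out
      else if (!fb && m) || (fb && out == ([] : List String)) then pvCollect (out ++ [hint]) rest
      else pvCollect out rest

def build_action_hints_alt (text : String) (category : String) : List String :=
  let low := PySem.Str.lower text
  -- stage 1: {k for k in KEYWORDS if k in low}
  let hits : PySem.Set String := PySem.Set.ofList (pvKeywords.filter (fun k => PySem.Str.isIn k low))
  -- stage 2: applicable rules reduced to (is_fallback, matched, hint)
  let sel : List (Bool × Bool × String) :=
    (pvRules.filter (fun r => r.1.isNone || r.1 == some category)).map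
      (fun r => (r.2.2.1,
                 (match r.2.1 with
                  | none => true
                  | some ks => ks.any (fun k => PySem.Set.contains hits k)),
                 r.2.2.2))
  pvCollect [] sel

-- ===== PRECONDITION & SPEC =====
def Spec_build_action_hints (text : String) (category : String) (out : List String) : Prop := out = build_action_hints_alt text category
instance (text : String) (category : String) (out : List String) : Decidable (Spec_build_action_hints text category out) := by unfold Spec_build_action_hints; infer_instance

-- ===== CLAIM (what is proved, stated in full; the proofs are below) =====
def Claim_equal_build_action_hints : Prop := ∀ (text : String) (category : String), Dom_build_action_hints text category → Spec_build_action_hints text category (build_action_hints text category)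

-- ===== LEMMAS AND PROOFS =====

-- membership in the precomputed hit set is the substring test, for keywords of the vocabulary
theorem pv_hits_any (low : String) (keys : List String)
    (h : ∀ k ∈ keys, k ∈ pvKeywords) :
    keys.any (fun k => PySem.Set.contains
        (PySem.Set.ofList (pvKeywords.filter (fun k => PySem.Str.isIn k low))) k)
      = keys.any (fun k => PySem.Str.isIn k low) := by
  induction keys with
  | nil => rfl
  | cons a as ih =>
    simp only [List.any_cons]
    rw [ih (fun k hk => h k (List.mem_cons_of_mem _ hk))]
    congr 1
    have ha : a ∈ pvKeywords := h a List.mem_cons_self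
    have hmem : a ∈ PySem.Set.ofList (pvKeywords.filter (fun k => PySem.Str.isIn k low))
        ↔ PySem.Str.isIn a low = true := by
      rw [PySem.Set.mem_ofList, List.mem_filter]
      simp [ha]
    cases hc : PySem.Str.isIn a low with
    | false =>
      cases hs : PySem.Set.contains
          (PySem.Set.ofList (pvKeywords.filter (fun k => PySem.Str.isIn k low))) a with
      | false => rfl
      | true =>
        have := hmem.1 ((PySem.Set.contains_iff _ _).1 hs)
        rw [this] at hc; exact absurd hc (by simp)
    | true =>
      exact (PySem.Set.contains_iff _ _).2 (hmem.2 hc)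

-- ===== VERDICT (by name: the statement is the Claim_ definition above) =====
set_option maxHeartbeats 4000000 in
theorem build_action_hints_spec : Claim_equal_build_action_hints := by
  intro text category _
  unfold Spec_build_action_hints
  simp only [build_action_hints, build_action_hints_alt]
  by_cases h1 : category = "crypto"
  · subst h1
    rw [show pvRules.filter (fun r => r.1.isNone || r.1 == some "crypto") =
      [ (none, some ["source", "源码", "provided code", "zip"], false,
       "read provided source/attachments first; map input -> transform -> check"),
        (none, some ["nc ", "netcat", "remote", "instance", "server"], false,
       "confirm interaction protocol and rate limits before brute-force"),
        (some "crypto", some ["rsa", "modulus", "n=", "e=", "d="], false,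
       "check RSA structure: small e, shared factors, partial key, common modulus"),
        (some "crypto", some ["lattice", "lll", "hnp", "coppersmith", "small root"], false,
       "estimate lattice dimensions/noise bounds; verify HNP/LLL preconditions"),
        (some "crypto", some ["ecdsa", "ecdh", "ecc", "nonce", "k reuse"], false,
       "test nonce reuse/partial leakage; recover private key via HNP"),
        (some "crypto", some ["oracle", "padding", "bleichenbacher", "oaep", "cbc"], false,
       "measure oracle distinguishability before large queries"),
        (some "crypto", none, true,
       "identify primitive + leakage model; search for exact model/paper keywords") ] from rfl]
    simp only [List.map]
    rw [pv_hits_any (PySem.Str.lower text) ["source", "源码", "provided code", "zip"] (by decide),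
        pv_hits_any (PySem.Str.lower text) ["nc ", "netcat", "remote", "instance", "server"] (by decide),
        pv_hits_any (PySem.Str.lower text) ["rsa", "modulus", "n=", "e=", "d="] (by decide),
        pv_hits_any (PySem.Str.lower text) ["lattice", "lll", "hnp", "coppersmith", "small root"] (by decide),
        pv_hits_any (PySem.Str.lower text) ["ecdsa", "ecdh", "ecc", "nonce", "k reuse"] (by decide),
        pv_hits_any (PySem.Str.lower text) ["oracle", "padding", "bleichenbacher", "oaep", "cbc"] (by decide)]
    simp only [List.isEmpty, Bool.false_or, Bool.true_or, eq_self_iff_true, Bool.false_eq_true, if_true, if_false,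
      List.nil_append, show (("crypto" : String) == "crypto") = true from rfl]
    generalize (["source", "源码", "provided code", "zip"].any (fun k => PySem.Str.isIn k (PySem.Str.lower text))) = b1
    generalize (["nc ", "netcat", "remote", "instance", "server"].any (fun k => PySem.Str.isIn k (PySem.Str.lower text))) = b2
    generalize (["rsa", "modulus", "n=", "e=", "d="].any (fun k => PySem.Str.isIn k (PySem.Str.lower text))) = b3
    generalize (["lattice", "lll", "hnp", "coppersmith", "small root"].any (fun k => PySem.Str.isIn k (PySem.Str.lower text))) = b4
    generalize (["ecdsa", "ecdh", "ecc", "nonce", "k reuse"].any (fun k => PySem.Str.isIn k (PySem.Str.lower text))) = b5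
    generalize (["oracle", "padding", "bleichenbacher", "oaep", "cbc"].any (fun k => PySem.Str.isIn k (PySem.Str.lower text))) = b6
    revert b1 b2 b3 b4 b5 b6
    decide
  · 
    by_cases h2 : category = "web"
    · subst h2
      rw [show pvRules.filter (fun r => r.1.isNone || r.1 == some "web") =
        [ (none, some ["source", "源码", "provided code", "zip"], false,
         "read provided source/attachments first; map input -> transform -> check"),
          (none, some ["nc ", "netcat", "remote", "instance", "server"], false,
         "confirm interaction protocol and rate limits before brute-force"),
          (some "web", some ["auth", "login", "cookie", "session", "jwt"], false,
         "trace auth/state transitions; reproduce one minimal request chain"),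
          (some "web", some ["upload", "file", "path traversal", "lfi", "rfi"], false,
         "map file handling and path normalization; attempt controlled upload/reading"),
          (some "web", some ["sqli", "xss", "ssti", "ssrf"], false,
         "verify vuln class with a minimal payload before fuzzing"),
          (some "web", none, true,
         "request/response map first; then automate minimal chain") ] from rfl]
      simp only [List.map]
      rw [pv_hits_any (PySem.Str.lower text) ["source", "源码", "provided code", "zip"] (by decide),
          pv_hits_any (PySem.Str.lower text) ["nc ", "netcat", "remote", "instance", "server"] (by decide),
          pv_hits_any (PySem.Str.lower text) ["auth", "login", "cookie", "session", "jwt"] (by decide),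
          pv_hits_any (PySem.Str.lower text) ["upload", "file", "path traversal", "lfi", "rfi"] (by decide),
          pv_hits_any (PySem.Str.lower text) ["sqli", "xss", "ssti", "ssrf"] (by decide)]
      simp only [List.isEmpty, Bool.false_or, Bool.true_or, eq_self_iff_true, Bool.false_eq_true, if_true, if_false,
        List.nil_append, show (("web" : String) == "crypto") = false from rfl, show (("web" : String) == "web") = true from rfl]
      generalize (["source", "源码", "provided code", "zip"].any (fun k => PySem.Str.isIn k (PySem.Str.lower text))) = b1
      generalize (["nc ", "netcat", "remote", "instance", "server"].any (fun k => PySem.Str.isIn k (PySem.Str.lower text))) = b2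
      generalize (["auth", "login", "cookie", "session", "jwt"].any (fun k => PySem.Str.isIn k (PySem.Str.lower text))) = b3
      generalize (["upload", "file", "path traversal", "lfi", "rfi"].any (fun k => PySem.Str.isIn k (PySem.Str.lower text))) = b4
      generalize (["sqli", "xss", "ssti", "ssrf"].any (fun k => PySem.Str.isIn k (PySem.Str.lower text))) = b5
      revert b1 b2 b3 b4 b5
      decide
    · 
      by_cases h3 : category = "rev"
      · subst h3
        rw [show pvRules.filter (fun r => r.1.isNone || r.1 == some "rev") =
          [ (none, some ["source", "源码", "provided code", "zip"], false,
           "read provided source/attachments first; map input -> transform -> check"),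
            (none, some ["nc ", "netcat", "remote", "instance", "server"], false,
           "confirm interaction protocol and rate limits before brute-force"),
            (some "rev", none, false,
           "locate compare/check site first; trace inputs backward"),
            (some "rev", some ["vm", "bytecode", "wasm", "obfus", "packer"], false,
           "decide static vs light dynamic; avoid full tracing until constraints appear") ] from rfl]
        simp only [List.map]
        rw [pv_hits_any (PySem.Str.lower text) ["source", "源码", "provided code", "zip"] (by decide),
            pv_hits_any (PySem.Str.lower text) ["nc ", "netcat", "remote", "instance", "server"] (by decide),
            pv_hits_any (PySem.Str.lower text) ["vm", "bytecode", "wasm", "obfus", "packer"] (by decide)]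
        simp only [List.isEmpty, Bool.false_or, Bool.true_or, eq_self_iff_true, Bool.false_eq_true, if_true, if_false,
          List.nil_append, show (("rev" : String) == "crypto") = false from rfl, show (("rev" : String) == "web") = false from rfl, show (("rev" : String) == "rev") = true from rfl]
        generalize (["source", "源码", "provided code", "zip"].any (fun k => PySem.Str.isIn k (PySem.Str.lower text))) = b1
        generalize (["nc ", "netcat", "remote", "instance", "server"].any (fun k => PySem.Str.isIn k (PySem.Str.lower text))) = b2
        generalize (["vm", "bytecode", "wasm", "obfus", "packer"].any (fun k => PySem.Str.isIn k (PySem.Str.lower text))) = b3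
        revert b1 b2 b3
        decide
      · 
        by_cases h4 : category = "pwn"
        · subst h4
          rw [show pvRules.filter (fun r => r.1.isNone || r.1 == some "pwn") =
            [ (none, some ["source", "源码", "provided code", "zip"], false,
             "read provided source/attachments first; map input -> transform -> check"),
              (none, some ["nc ", "netcat", "remote", "instance", "server"], false,
             "confirm interaction protocol and rate limits before brute-force"),
              (some "pwn", none, false,
             "confirm mitigations and crash primitive; identify stack/heap/fmt direction"),
              (some "pwn", some ["libc", "ld", "one_gadget"], false,
             "align libc/ld early; stabilize offsets before exploit") ] from rfl]
          simp only [List.map]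
          rw [pv_hits_any (PySem.Str.lower text) ["source", "源码", "provided code", "zip"] (by decide),
              pv_hits_any (PySem.Str.lower text) ["nc ", "netcat", "remote", "instance", "server"] (by decide),
              pv_hits_any (PySem.Str.lower text) ["libc", "ld", "one_gadget"] (by decide)]
          simp only [List.isEmpty, Bool.false_or, Bool.true_or, eq_self_iff_true, Bool.false_eq_true, if_true, if_false,
            List.nil_append, show (("pwn" : String) == "crypto") = false from rfl, show (("pwn" : String) == "web") = false from rfl, show (("pwn" : String) == "rev") = false from rfl, show (("pwn" : String) == "pwn") = true from rfl]
          generalize (["source", "源码", "provided code", "zip"].any (fun k => PySem.Str.isIn k (PySem.Str.lower text))) = b1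
          generalize (["nc ", "netcat", "remote", "instance", "server"].any (fun k => PySem.Str.isIn k (PySem.Str.lower text))) = b2
          generalize (["libc", "ld", "one_gadget"].any (fun k => PySem.Str.isIn k (PySem.Str.lower text))) = b3
          revert b1 b2 b3
          decide
        · 
          by_cases h5 : category = "forensics"
          · subst h5
            rw [show pvRules.filter (fun r => r.1.isNone || r.1 == some "forensics") =
              [ (none, some ["source", "源码", "provided code", "zip"], false,
               "read provided source/attachments first; map input -> transform -> check"),
                (none, some ["nc ", "netcat", "remote", "instance", "server"], false,
               "confirm interaction protocol and rate limits before brute-force"),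
                (some "forensics", none, false,
               "do file triage: type/metadata/strings/extract; then targeted tools"),
                (some "forensics", some ["pcap", "pcapng", "wireshark", "tshark"], false,
               "filter by protocols and carve artifacts; track offsets") ] from rfl]
            simp only [List.map]
            rw [pv_hits_any (PySem.Str.lower text) ["source", "源码", "provided code", "zip"] (by decide),
                pv_hits_any (PySem.Str.lower text) ["nc ", "netcat", "remote", "instance", "server"] (by decide),
                pv_hits_any (PySem.Str.lower text) ["pcap", "pcapng", "wireshark", "tshark"] (by decide)]
            simp only [List.isEmpty, Bool.false_or, Bool.true_or, eq_self_iff_true, Bool.false_eq_true, if_true, if_false,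
              List.nil_append, show (("forensics" : String) == "crypto") = false from rfl, show (("forensics" : String) == "web") = false from rfl, show (("forensics" : String) == "rev") = false from rfl, show (("forensics" : String) == "pwn") = false from rfl, show (("forensics" : String) == "forensics") = true from rfl]
            generalize (["source", "源码", "provided code", "zip"].any (fun k => PySem.Str.isIn k (PySem.Str.lower text))) = b1
            generalize (["nc ", "netcat", "remote", "instance", "server"].any (fun k => PySem.Str.isIn k (PySem.Str.lower text))) = b2
            generalize (["pcap", "pcapng", "wireshark", "tshark"].any (fun k => PySem.Str.isIn k (PySem.Str.lower text))) = b3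
            revert b1 b2 b3
            decide
          · 
            by_cases h6 : category = "osint"
            · subst h6
              rw [show pvRules.filter (fun r => r.1.isNone || r.1 == some "osint") =
                [ (none, some ["source", "源码", "provided code", "zip"], false,
                 "read provided source/attachments first; map input -> transform -> check"),
                  (none, some ["nc ", "netcat", "remote", "instance", "server"], false,
                 "confirm interaction protocol and rate limits before brute-force"),
                  (some "osint", none, false,
                 "extract unique identifiers first; pivot via reliable sources") ] from rfl]
              simp only [List.map]
              rw [pv_hits_any (PySem.Str.lower text) ["source", "源码", "provided code", "zip"] (by decide),
                  pv_hits_any (PySem.Str.lower text) ["nc ", "netcat", "remote", "instance", "server"] (by decide)]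
              simp only [List.isEmpty, Bool.false_or, Bool.true_or, eq_self_iff_true, Bool.false_eq_true, if_true, if_false,
                List.nil_append, show (("osint" : String) == "crypto") = false from rfl, show (("osint" : String) == "web") = false from rfl, show (("osint" : String) == "rev") = false from rfl, show (("osint" : String) == "pwn") = false from rfl, show (("osint" : String) == "forensics") = false from rfl, show (("osint" : String) == "osint") = true from rfl]
              generalize (["source", "源码", "provided code", "zip"].any (fun k => PySem.Str.isIn k (PySem.Str.lower text))) = b1
              generalize (["nc ", "netcat", "remote", "instance", "server"].any (fun k => PySem.Str.isIn k (PySem.Str.lower text))) = b2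
              revert b1 b2
              decide
            · 
              by_cases h7 : category = "malware"
              · subst h7
                rw [show pvRules.filter (fun r => r.1.isNone || r.1 == some "malware") =
                  [ (none, some ["source", "源码", "provided code", "zip"], false,
                   "read provided source/attachments first; map input -> transform -> check"),
                    (none, some ["nc ", "netcat", "remote", "instance", "server"], false,
                   "confirm interaction protocol and rate limits before brute-force"),
                    (some "malware", none, false,
                   "check packer/obfuscation; carve config/IOC before heavy dynamic analysis") ] from rfl]
                simp only [List.map]
                rw [pv_hits_any (PySem.Str.lower text) ["source", "源码", "provided code", "zip"] (by decide),
                    pv_hits_any (PySem.Str.lower text) ["nc ", "netcat", "remote", "instance", "server"] (by decide)]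
                simp only [List.isEmpty, Bool.false_or, Bool.true_or, eq_self_iff_true, Bool.false_eq_true, if_true, if_false,
                  List.nil_append, show (("malware" : String) == "crypto") = false from rfl, show (("malware" : String) == "web") = false from rfl, show (("malware" : String) == "rev") = false from rfl, show (("malware" : String) == "pwn") = false from rfl, show (("malware" : String) == "forensics") = false from rfl, show (("malware" : String) == "osint") = false from rfl, show (("malware" : String) == "malware") = true from rfl]
                generalize (["source", "源码", "provided code", "zip"].any (fun k => PySem.Str.isIn k (PySem.Str.lower text))) = b1
                generalize (["nc ", "netcat", "remote", "instance", "server"].any (fun k => PySem.Str.isIn k (PySem.Str.lower text))) = b2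
                revert b1 b2
                decide
              · 
                by_cases h8 : category = "misc"
                · subst h8
                  rw [show pvRules.filter (fun r => r.1.isNone || r.1 == some "misc") =
                    [ (none, some ["source", "源码", "provided code", "zip"], false,
                     "read provided source/attachments first; map input -> transform -> check"),
                      (none, some ["nc ", "netcat", "remote", "instance", "server"], false,
                     "confirm interaction protocol and rate limits before brute-force"),
                      (some "misc", none, false,
                     "build artifact index; automate decode/extract loops early") ] from rfl]
                  simp only [List.map]
                  rw [pv_hits_any (PySem.Str.lower text) ["source", "源码", "provided code", "zip"] (by decide),
                      pv_hits_any (PySem.Str.lower text) ["nc ", "netcat", "remote", "instance", "server"] (by decide)]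
                  simp only [List.isEmpty, Bool.false_or, Bool.true_or, eq_self_iff_true, Bool.false_eq_true, if_true, if_false,
                    List.nil_append, show (("misc" : String) == "crypto") = false from rfl, show (("misc" : String) == "web") = false from rfl, show (("misc" : String) == "rev") = false from rfl, show (("misc" : String) == "pwn") = false from rfl, show (("misc" : String) == "forensics") = false from rfl, show (("misc" : String) == "osint") = false from rfl, show (("misc" : String) == "malware") = false from rfl, show (("misc" : String) == "misc") = true from rfl]
                  generalize (["source", "源码", "provided code", "zip"].any (fun k => PySem.Str.isIn k (PySem.Str.lower text))) = b1
                  generalize (["nc ", "netcat", "remote", "instance", "server"].any (fun k => PySem.Str.isIn k (PySem.Str.lower text))) = b2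
                  revert b1 b2
                  decide
                · 
                  have hf : pvRules.filter (fun r => r.1.isNone || r.1 == some category) =
                      [ (none, some ["source", "源码", "provided code", "zip"], false,
                         "read provided source/attachments first; map input -> transform -> check"),
                        (none, some ["nc ", "netcat", "remote", "instance", "server"], false,
                         "confirm interaction protocol and rate limits before brute-force") ] := by
                    simp [pvRules, Ne.symm h1, Ne.symm h2, Ne.symm h3, Ne.symm h4,
                      Ne.symm h5, Ne.symm h6, Ne.symm h7, Ne.symm h8]
                  rw [hf]
                  simp only [List.map]
                  rw [pv_hits_any (PySem.Str.lower text) ["source", "源码", "provided code", "zip"] (by decide),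
                      pv_hits_any (PySem.Str.lower text) ["nc ", "netcat", "remote", "instance", "server"] (by decide)]
                  simp only [beq_iff_eq, h1, h2, h3, h4, h5, h6, h7, h8, if_false, List.nil_append]
                  generalize (["source", "源码", "provided code", "zip"].any (fun k => PySem.Str.isIn k (PySem.Str.lower text))) = b1
                  generalize (["nc ", "netcat", "remote", "instance", "server"].any (fun k => PySem.Str.isIn k (PySem.Str.lower text))) = b2
                  revert b1 b2
                  decide
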